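-- pv_equiv track=rewrite | github.com/ganyipeng/tr | split_pic.py | find_right_points
-- ===== SOURCE A (Python) =====
-- def find_right_points(index, points):
--     '''
--     @param index: 当前点的索引
--     @param points: 所有的点
--     @return: 返回和当前点一行的右边所有点
--     '''
--     right_points = []
--     for i in range(index+1, len(points)):
--         if points[i][0] > points[index][0] and abs(points[i][1] - points[index][1]) < 5:
--             right_points.append(points[i])
--         if abs(points[i][1] - points[index][1]) > 5:
--             break
--     return right_points
-- ===== SOURCE B (Python) =====
-- def find_right_points(index, points):
--     '''Two-phase rewrite: slice the tail, locate the row boundary, then filter.'''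
--     tail = points[index+1:]
--     if not tail:
--         return []
--     x0, y0 = points[index]
--     cut = next((k for k, p in enumerate(tail) if abs(p[1] - y0) > 5), len(tail))
--     return [p for p in tail[:cut] if p[0] > x0 and abs(p[1] - y0) < 5]
-- ===== Notes on version B (the rewrite author's own statement) =====
-- stated objective: simpler
-- what changed: Replaces the single indexed loop with append and break by a two-phase decomposition: slice the tail after the reference point, find the row-boundary cut position, then filter the prefix; Pre_ excludes negative indices, on which A's value comes from Python's accidental negative-index wraparound (or A raises IndexError).
import Mathlib
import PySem

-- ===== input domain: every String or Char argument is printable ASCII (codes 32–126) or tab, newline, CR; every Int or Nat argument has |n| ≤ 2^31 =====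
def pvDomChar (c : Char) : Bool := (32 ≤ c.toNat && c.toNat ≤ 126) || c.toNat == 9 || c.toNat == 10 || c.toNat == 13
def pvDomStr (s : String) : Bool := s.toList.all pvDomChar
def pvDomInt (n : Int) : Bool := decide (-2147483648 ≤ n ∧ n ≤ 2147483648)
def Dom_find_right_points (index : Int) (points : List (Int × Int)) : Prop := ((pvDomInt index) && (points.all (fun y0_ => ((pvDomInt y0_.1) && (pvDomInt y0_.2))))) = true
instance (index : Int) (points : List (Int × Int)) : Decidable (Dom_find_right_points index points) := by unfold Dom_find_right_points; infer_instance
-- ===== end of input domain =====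

-- B restructures A's single indexed loop (append + break) as slice-tail / find-cut / filter-prefix (objective: simpler).

-- ===== PORT A =====
-- the 'for i in range(index+1, len(points))' loop with its mid-loop break;
-- pyGet? none (IndexError) stops with the list so far (unreachable under Pre_)
def findRightLoop (index : Int) (points : List (Int × Int)) : List Int → List (Int × Int)
  | [] => []
  | i :: rest =>
    match PySem.List.pyGet? points i, PySem.List.pyGet? points index with
    | some p, some q =>
      let hd := if q.1 < p.1 ∧ |p.2 - q.2| < 5 then [p] else []
      if 5 < |p.2 - q.2| then hd else hd ++ findRightLoop index points rest
    | _, _ => []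

def find_right_points (index : Int) (points : List (Int × Int)) : List (Int × Int) :=
  findRightLoop index points (PySem.List.pyRange (index + 1) (points.length : Int) 1)

-- ===== PORT B =====
def find_right_points_alt (index : Int) (points : List (Int × Int)) : List (Int × Int) :=
  let tail := PySem.List.slice points (some (index + 1)) none
  if tail = [] then []
  else
    match PySem.List.pyGet? points index with
    | none => []   -- Python B raises IndexError here; unreachable under Pre_
    | some q =>
      let cut := tail.findIdx (fun p => decide (5 < |p.2 - q.2|))  -- next(..., len(tail))
      (tail.take cut).filter (fun p => decide (q.1 < p.1 ∧ |p.2 - q.2| < 5))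

-- ===== PRECONDITION & SPEC =====
-- Pre_ excludes negative indices, on which A returns via Python's accidental
-- negative-index wraparound (or raises IndexError when index < -len(points)).
def Pre_find_right_points (index : Int) (points : List (Int × Int)) : Prop := 0 ≤ index
instance (index : Int) (points : List (Int × Int)) : Decidable (Pre_find_right_points index points) := by unfold Pre_find_right_points; infer_instance
def pvWitness_find_right_points : Int × (List (Int × Int)) := (0, [(1, 2), (4, 3), (9, 20)])

def Spec_find_right_points (index : Int) (points : List (Int × Int)) (out : List (Int × Int)) : Prop := out = find_right_points_alt index points
instance (index : Int) (points : List (Int × Int)) (out : List (Int × Int)) : Decidable (Spec_find_right_points index points out) := by unfold Spec_find_right_points; infer_instance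

-- ===== CLAIM (what is proved, stated in full; the proofs are below) =====
def Claim_equal_find_right_points : Prop := ∀ (index : Int) (points : List (Int × Int)), Dom_find_right_points index points → Pre_find_right_points index points → Spec_find_right_points index points (find_right_points index points)

-- ===== LEMMAS AND PROOFS =====

-- B's 'take cut' of the tail is the takeWhile of the complemented boundary test
lemma take_findIdx_eq_takeWhile {α : Type} (p : α → Bool) (xs : List α) :
    xs.take (xs.findIdx p) = xs.takeWhile (fun a => ! p a) := by
  induction xs with
  | nil => rfl
  | cons x t ih =>
    by_cases h : p x
    · simp [List.findIdx_cons, h]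
    · simp [List.findIdx_cons, h, ih]

-- the loop over range(n, len) equals filter ∘ takeWhile on drop n
lemma loop_eq (index : Int) (points : List (Int × Int)) (q : Int × Int)
    (hq : PySem.List.pyGet? points index = some q) :
    ∀ (fuel n : Nat), points.length - n ≤ fuel →
      findRightLoop index points (PySem.List.pyRange (n : Int) (points.length : Int) 1)
        = ((points.drop n).takeWhile (fun p => ! decide (5 < |p.2 - q.2|))).filter
            (fun p => decide (q.1 < p.1 ∧ |p.2 - q.2| < 5)) := by
  intro fuel
  induction fuel with
  | zero =>
    intro n h
    have hn : points.length ≤ n := by omega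
    rw [PySem.List.pyRange_one_eq_nil (by exact_mod_cast hn),
        List.drop_eq_nil_of_le hn]
    rfl
  | succ fuel ih =>
    intro n h
    by_cases hn : n < points.length
    · rw [PySem.List.pyRange_one_cons (by exact_mod_cast hn)]
      have hget : PySem.List.pyGet? points (n : Int) = some points[n] := by
        simp [List.getElem?_eq_getElem hn]
      have hdrop : points.drop n = points[n] :: points.drop (n + 1) :=
        List.drop_eq_getElem_cons hn
      have hcast : (n : Int) + 1 = ((n + 1 : Nat) : Int) := by push_cast; ring
      rw [hdrop]
      show (match PySem.List.pyGet? points (n : Int), PySem.List.pyGet? points index with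
        | some p, some q' =>
          let hd := if q'.1 < p.1 ∧ |p.2 - q'.2| < 5 then [p] else []
          if 5 < |p.2 - q'.2| then hd else
            hd ++ findRightLoop index points (PySem.List.pyRange ((n : Int) + 1) (points.length : Int) 1)
        | _, _ => []) = _
      rw [hget, hq, hcast, ih (n + 1) (by omega), List.takeWhile_cons]
      by_cases hb : 5 < |(points[n].2 : Int) - q.2|
      · have hlt : ¬ |(points[n].2 : Int) - q.2| < 5 := by omega
        simp only [hb, decide_true, Bool.not_true, Bool.false_eq_true, if_false, List.filter_nil]
        simp [hlt]
      · simp only [hb, decide_false, Bool.not_false, if_true, List.filter_cons]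
        by_cases hf : q.1 < points[n].1 ∧ |(points[n].2 : Int) - q.2| < 5 <;>
          simp [hf]
    · have hn' : points.length ≤ n := by omega
      rw [PySem.List.pyRange_one_eq_nil (by exact_mod_cast hn'),
          List.drop_eq_nil_of_le hn']
      rfl

-- ===== VERDICT (by name: the statement is the Claim_ definition above) =====
theorem find_right_points_spec : Claim_equal_find_right_points := by
  intro index points _ hpre
  unfold Spec_find_right_points find_right_points find_right_points_alt
  have hix : index = ((index.toNat : Nat) : Int) := (Int.toNat_of_nonneg hpre).symm
  have hslice : PySem.List.slice points (some (index + 1)) none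
      = points.drop (index.toNat + 1) := by
    have h1 : index + 1 = ((index.toNat + 1 : Nat) : Int) := by omega
    rw [h1, PySem.List.slice_from_natCast]
  by_cases hlen : index.toNat + 1 ≥ points.length
  · have hr : PySem.List.pyRange (index + 1) (points.length : Int) 1 = [] := by
      apply PySem.List.pyRange_one_eq_nil
      rw [hix]; exact_mod_cast hlen
    have hd : points.drop (index.toNat + 1) = [] := List.drop_eq_nil_of_le hlen
    simp [hr, hslice, hd, findRightLoop]
  · have hlt : index.toNat < points.length := by omega
    have hpre' : (0 : Int) ≤ index := hpre
    have hq : PySem.List.pyGet? points index = some points[index.toNat] :=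
      PySem.List.pyGet?_eq_some_getElem points hpre' (by omega)
    have hd : points.drop (index.toNat + 1) ≠ [] := by
      intro hnil
      have := List.drop_eq_nil_iff.mp hnil
      omega
    have hr : PySem.List.pyRange (index + 1) (points.length : Int) 1
        = PySem.List.pyRange ((index.toNat + 1 : Nat) : Int) (points.length : Int) 1 := by
      rw [hix]; norm_num
    rw [hr, loop_eq index points points[index.toNat] hq (points.length - (index.toNat + 1)) (index.toNat + 1) (by omega)]
    simp only [hslice, hq]
    rw [if_neg hd]
    rw [take_findIdx_eq_takeWhile]
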